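-- pv_equiv track=rewrite | github.com/tsujin/psychic-computing-machine | src/procgen/wavefunctioncollapse.py | parse_tile_map
-- ===== SOURCE A (Python) =====
-- DIRS = {
--     'N': (0, -1),
--     'S': (0, 1),
--     'E': (1, 0),
--     'W': (-1, 0)
-- }
--
-- def neighboring_directions(coordinate: tuple[int, int], map_width: int, map_height: int) -> list[str]:
--     """
--     Helper function which finds all valid directions a given tile can have neighbors in.
--
--     Args:
--         coordinate (tuple[int, int]): A coordinate in a map.
--
--         map_width (int): Width of the map being used.
--
--         map_height (int): Height of the map being used.
--
--     Returns:
--         A list of strings containing all valid directions in the form of 'N', 'E', 'S', 'W'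
--     """
--
--     x, y = coordinate
--     neighbors = []
--
--     if y > 0: neighbors.append('N')
--     if y < map_height-1: neighbors.append('S')
--     if x > 0: neighbors.append('W')
--     if x < map_width-1: neighbors.append('E')
--
--     return neighbors
--
-- def parse_tile_map(tile_map: list[list[str]]) -> tuple[set[str], dict[str, int]]:
--     """
--     Parses a tilemap and returns possible neighbor tile types and weights for each tile
--
--     Args:
--         map (list): The input tile map to be parsed
--
--     Returns:
--         A set of possible neighbor tile types and a dictionary of weights for each tile type
--     """
--
--     weights_map = {}
--     possible_neighbors = set()
--     map_width = len(tile_map[0])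
--     map_height = len(tile_map)
--
--     for i_y, row in enumerate(tile_map):
--         for i_x, tile in enumerate(row):
--             if tile not in weights_map:
--                 weights_map[tile] = 0
--             weights_map[tile] += 1
--
--             for dir in neighboring_directions((i_x, i_y), map_width, map_height):
--                 dir_x, dir_y = DIRS[dir]
--                 possible_neighbors.add((tile, tile_map[i_y + dir_y][i_x + dir_x], dir))
--
--     return possible_neighbors, weights_map
-- ===== SOURCE B (Python) =====
-- def parse_tile_map(tile_map):
--     """Stencil-by-shifting reformulation: instead of per-cell coordinate
--     arithmetic driven by a direction helper and the DIRS table, build shifted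
--     copies of the grid (padded with None sentinels) and zip them, so every
--     neighbor is read positionally; weights are counted over the flattened grid."""
--     map_width = len(tile_map[0])
--
--     weights_map = {}
--     for tile in [tile for row in tile_map for tile in row]:
--         weights_map[tile] = weights_map.get(tile, 0) + 1
--
--     blank = [None] * map_width
--     norths = [blank] + tile_map[:-1]
--     souths = tile_map[1:] + [blank]
--
--     edges = []
--     for row, nr, sr in zip(tile_map, norths, souths):
--         wr = [None] + row[:-1]
--         er = row[1:] + [None]
--         for t, n, s, w, e in zip(row, nr, sr, wr, er):
--             if n is not None: edges.append((t, n, 'N'))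
--             if s is not None: edges.append((t, s, 'S'))
--             if w is not None: edges.append((t, w, 'W'))
--             if e is not None: edges.append((t, e, 'E'))
--     return set(edges), weights_map
-- ===== Notes on version B (the rewrite author's own statement) =====
-- stated objective: alternative
-- what changed: Replaces the per-cell coordinate arithmetic (direction-name helper feeding the DIRS delta table and global (x,y) indexing) by a stencil-via-shifted-grids formulation: the grid is zipped with None-padded shifted copies of itself (up/down/left/right), so each neighbor is read positionally with no index arithmetic or bounds tests against coordinates; weights are counted in one pass over the flattened grid.
import Mathlib
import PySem

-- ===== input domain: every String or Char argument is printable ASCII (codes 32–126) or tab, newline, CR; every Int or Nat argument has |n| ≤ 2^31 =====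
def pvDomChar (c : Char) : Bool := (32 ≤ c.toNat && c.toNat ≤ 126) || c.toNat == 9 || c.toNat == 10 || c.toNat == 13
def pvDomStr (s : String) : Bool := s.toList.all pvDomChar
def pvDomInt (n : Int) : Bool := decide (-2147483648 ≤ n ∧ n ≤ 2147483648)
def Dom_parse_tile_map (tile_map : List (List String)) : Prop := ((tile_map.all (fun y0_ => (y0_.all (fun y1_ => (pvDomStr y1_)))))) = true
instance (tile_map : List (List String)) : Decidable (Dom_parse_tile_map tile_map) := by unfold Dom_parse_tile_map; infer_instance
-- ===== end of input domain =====

-- B replaces A's per-cell coordinate arithmetic (direction-name helper feeding the DIRS delta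
-- table) by a stencil-via-shifted-grids formulation: the grid is zipped with None-padded shifted
-- copies of itself, so each neighbor is read positionally, and weights are counted in one pass
-- over the flattened grid — an alternative of the same cost.

-- ===== PORT A =====
def pvDIRS : PySem.Dict String (Int × Int) :=
  PySem.Dict.ofList [("N", (0, -1)), ("S", (0, 1)), ("E", (1, 0)), ("W", (-1, 0))]

def neighboring_directions (coordinate : Int × Int) (map_width map_height : Int) : List String :=
  let x := coordinate.1
  let y := coordinate.2
  let neighbors : List String := []
  let neighbors := if y > 0 then neighbors ++ ["N"] else neighbors
  let neighbors := if y < map_height - 1 then neighbors ++ ["S"] else neighbors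
  let neighbors := if x > 0 then neighbors ++ ["W"] else neighbors
  let neighbors := if x < map_width - 1 then neighbors ++ ["E"] else neighbors
  neighbors

def parse_tile_map (tile_map : List (List String)) : (List (String × String × String)) × (List (String × Int)) :=
  -- len(tile_map[0]) raises IndexError on an empty map: excluded by Pre_; pyGetD's default is never read inside Pre_
  let map_width : Int := ((PySem.List.pyGetD tile_map 0 []).length : Int)
  let map_height : Int := (tile_map.length : Int)
  let res :=
    (PySem.List.enumerate tile_map).foldl (fun acc iy_row =>
      (PySem.List.enumerate iy_row.2).foldl (fun acc ix_tile =>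
        let weights := if acc.2.contains ix_tile.2 then acc.2 else acc.2.insert ix_tile.2 0
        let weights := weights.modify ix_tile.2 0 (· + 1)
        let neighbors :=
          (neighboring_directions (ix_tile.1, iy_row.1) map_width map_height).foldl (fun s dir =>
            let dxy := pvDIRS.getD dir (0, 0)
            PySem.Set.add s (ix_tile.2,
              PySem.List.pyGetD (PySem.List.pyGetD tile_map (iy_row.1 + dxy.2) []) (ix_tile.1 + dxy.1) "",
              dir)) acc.1
        (neighbors, weights)) acc)
      ((PySem.Set.empty : PySem.Set (String × String × String)), (PySem.Dict.empty : PySem.Dict String Int))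
  (res.1, res.2.items)

-- ===== PORT B =====
-- Source B's shifted-grid stencil: rows are lifted to 'Option String' so the None sentinels mix with
-- tiles exactly as in the Python lists; Python's 5-ary zip becomes nested binary zips.
def parse_tile_map_alt (tile_map : List (List String)) : (List (String × String × String)) × (List (String × Int)) :=
  -- len(tile_map[0]) raises IndexError on an empty map: excluded by Pre_
  let map_width := (PySem.List.pyGetD tile_map 0 []).length
  let weights_map :=
    (tile_map.flatMap (fun row => row)).foldl
      (fun d tile => d.insert tile (d.getD tile 0 + 1)) (PySem.Dict.empty : PySem.Dict String Int)
  let blank : List (Option String) := List.replicate map_width none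
  let norths := blank :: PySem.List.slice (tile_map.map (fun r => r.map some)) none (some (-1))
  let souths := PySem.List.slice (tile_map.map (fun r => r.map some)) (some 1) none ++ [blank]
  let edges :=
    (tile_map.zip (norths.zip souths)).foldl (fun es rns =>
      let row := rns.1
      let wr : List (Option String) := none :: PySem.List.slice (row.map some) none (some (-1))
      let er : List (Option String) := PySem.List.slice (row.map some) (some 1) none ++ [none]
      (row.zip ((rns.2.1).zip ((rns.2.2).zip (wr.zip er)))).foldl (fun es c =>
        let es := c.2.1.elim es (fun n => es ++ [(c.1, n, "N")])
        let es := c.2.2.1.elim es (fun s => es ++ [(c.1, s, "S")])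
        let es := c.2.2.2.1.elim es (fun w => es ++ [(c.1, w, "W")])
        c.2.2.2.2.elim es (fun e => es ++ [(c.1, e, "E")])) es)
      ([] : List (String × String × String))
  (PySem.Set.ofList edges, weights_map.items)

-- ===== PRECONDITION & SPEC =====
-- Pre_ excludes exactly the inputs where A raises IndexError: the empty map (tile_map[0]) and
-- ragged maps (every ragged map reaches an out-of-range neighbour access).
def Pre_parse_tile_map (tile_map : List (List String)) : Prop :=
  tile_map ≠ [] ∧ ∀ row ∈ tile_map, row.length = (tile_map.headD []).length
instance (tile_map : List (List String)) : Decidable (Pre_parse_tile_map tile_map) := by unfold Pre_parse_tile_map; infer_instance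

def pvWitness_parse_tile_map : List (List String) := [["a", "b"], ["b", "a"]]

def Spec_parse_tile_map (tile_map : List (List String)) (out : (List (String × String × String)) × (List (String × Int))) : Prop := out = parse_tile_map_alt tile_map
instance (tile_map : List (List String)) (out : (List (String × String × String)) × (List (String × Int))) : Decidable (Spec_parse_tile_map tile_map out) := by unfold Spec_parse_tile_map; infer_instance

-- ===== CLAIM (what is proved, stated in full; the proofs are below) =====
def Claim_equal_parse_tile_map : Prop := ∀ (tile_map : List (List String)), Dom_parse_tile_map tile_map → Pre_parse_tile_map tile_map → Spec_parse_tile_map tile_map (parse_tile_map tile_map)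

-- ===== LEMMAS AND PROOFS =====

-- a fold whose step updates the two components of a pair state independently splits into two folds
theorem pvFoldlProd {β γ σ₁ σ₂ : Type} (rows : List γ) (inner : γ → List β)
    (F : γ → σ₁ → β → σ₁) (G : γ → σ₂ → β → σ₂) (a : σ₁) (b : σ₂) :
    rows.foldl (fun acc r => (inner r).foldl (fun acc e => (F r acc.1 e, G r acc.2 e)) acc) (a, b)
    = (rows.foldl (fun s r => (inner r).foldl (F r) s) a,
       rows.foldl (fun t r => (inner r).foldl (G r) t) b) := by
  induction rows generalizing a b with
  | nil => rfl
  | cons r rs ih => simp only [List.foldl_cons, PySem.List.foldl_prod_mk, ih]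

-- a fold over enumerate that ignores the index is a fold over the list
theorem pvFoldlEnumSnd {α β : Type} (xs : List α) (f : β → α → β) (b : β) :
    (PySem.List.enumerate xs).foldl (fun d p => f d p.2) b = xs.foldl f b := by
  conv_rhs => rw [← PySem.List.map_snd_enumerate xs 0]
  rw [List.foldl_map]

-- A's membership-test-then-increment step equals B's get-based counting step
theorem pvDictStep (d : PySem.Dict String Int) (t : String) :
    ((if d.contains t then d else d.insert t 0).modify t 0 (· + 1)) = d.insert t (d.getD t 0 + 1) := by
  by_cases h : d.contains t = true
  · simp [PySem.Dict.modify, h]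
  · have h' : d.contains t = false := eq_false_of_ne_true h
    rw [h']
    simp [PySem.Dict.modify, PySem.Dict.getD_insert_self, PySem.Dict.insert_insert_self,
      PySem.Dict.getD_of_not_contains d (0 : Int) h']

-- a loop of set.update's is one update by the concatenation
theorem pvFoldlUpdateFlatMap {α β : Type} [BEq α] (l : List β) (f : β → List α) (s : PySem.Set α) :
    l.foldl (fun s x => PySem.Set.update s (f x)) s = s.update (l.flatMap f) := by
  induction l generalizing s with
  | nil => simp [PySem.Set.update]
  | cons x xs ih => simp [List.flatMap_cons, PySem.Set.update_append, ih]

def pvCellList (tm : List (List String)) (y x : Nat) : List (String × String × String) :=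
  let t := (tm.getD y []).getD x ""
  (if 0 < y then [(t, (tm.getD (y - 1) []).getD x "", "N")] else []) ++
  (if y + 1 < tm.length then [(t, (tm.getD (y + 1) []).getD x "", "S")] else []) ++
  (if 0 < x then [(t, (tm.getD y []).getD (x - 1) "", "W")] else []) ++
  (if x + 1 < (tm.headD []).length then [(t, (tm.getD y []).getD (x + 1) "", "E")] else [])

def pvStream (tm : List (List String)) : List (String × String × String) :=
  (List.range tm.length).flatMap (fun y =>
    (List.range (tm.headD []).length).flatMap (fun x => pvCellList tm y x))

theorem pvHW0 (tm : List (List String)) : PySem.List.pyGetD tm (0:Int) [] = tm.headD [] := by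
  cases tm <;> simp [PySem.List.pyGetD, PySem.List.pyGet?, PySem.List.pyIdx?]

theorem pvMapSnoc {α β : Type} (f : α → β) (l : List α) (c : Prop) [Decidable c] (a : α) :
    List.map f (if c then l ++ [a] else l) = List.map f l ++ (if c then [f a] else []) := by
  split_ifs <;> simp

theorem pvCellA (tm : List (List String)) (y x : Nat)
    (hy : y < tm.length) (hx : x < (tm.headD []).length)
    (hW0 : PySem.List.pyGetD tm (0:Int) [] = tm.headD []) :
    (neighboring_directions ((x : Int), (y : Int)) (((PySem.List.pyGetD tm 0 []).length : Int)) ((tm.length : Int))).map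
      (fun dir =>
        ((tm.getD y []).getD x "",
          PySem.List.pyGetD (PySem.List.pyGetD tm ((y : Int) + (pvDIRS.getD dir (0, 0)).2) [])
            ((x : Int) + (pvDIRS.getD dir (0, 0)).1) "", dir))
    = pvCellList tm y x := by
  have eN : pvDIRS.getD "N" ((0 : Int), (0 : Int)) = (0, -1) := rfl
  have eS : pvDIRS.getD "S" ((0 : Int), (0 : Int)) = (0, 1) := rfl
  have eW : pvDIRS.getD "W" ((0 : Int), (0 : Int)) = (-1, 0) := rfl
  have eE : pvDIRS.getD "E" ((0 : Int), (0 : Int)) = (1, 0) := rfl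
  unfold neighboring_directions pvCellList
  rw [hW0]
  simp only [pvMapSnoc, List.nil_append]
  refine congrArg₂ (· ++ ·) (congrArg₂ (· ++ ·) (congrArg₂ (· ++ ·) ?_ ?_) ?_) ?_
  · split_ifs with h1 h2 h2
    · simp only [List.map_cons, List.map_nil, eN]
      rw [show ((y:Int) + (0,(-1:Int)).2) = ((y - 1 : Nat) : Int) by simp; omega,
        show ((x:Int) + (0,(-1:Int)).1) = ((x : Nat) : Int) by simp,
        PySem.List.pyGetD_natCast, PySem.List.pyGetD_natCast]
    · omega
    · omega
    · rfl
  · split_ifs with h1 h2 h2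
    · simp only [List.map_cons, List.map_nil, eS]
      rw [show ((y:Int) + ((0:Int),(1:Int)).2) = ((y + 1 : Nat) : Int) by simp,
        show ((x:Int) + ((0:Int),(1:Int)).1) = ((x : Nat) : Int) by simp,
        PySem.List.pyGetD_natCast, PySem.List.pyGetD_natCast]
    · omega
    · omega
    · rfl
  · split_ifs with h1 h2 h2
    · simp only [List.map_cons, List.map_nil, eW]
      rw [show ((y:Int) + ((-1:Int),(0:Int)).2) = ((y : Nat) : Int) by simp,
        show ((x:Int) + ((-1:Int),(0:Int)).1) = ((x - 1 : Nat) : Int) by simp; omega,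
        PySem.List.pyGetD_natCast, PySem.List.pyGetD_natCast]
    · omega
    · omega
    · rfl
  · split_ifs with h1 h2 h2
    · simp only [List.map_cons, List.map_nil, eE]
      rw [show ((y:Int) + ((1:Int),(0:Int)).2) = ((y : Nat) : Int) by simp,
        show ((x:Int) + ((1:Int),(0:Int)).1) = ((x + 1 : Nat) : Int) by simp,
        PySem.List.pyGetD_natCast, PySem.List.pyGetD_natCast]
    · omega
    · omega
    · rfl

theorem pvStreamA (tm : List (List String))
    (hrect : ∀ row ∈ tm, row.length = (tm.headD []).length) :
    (PySem.List.enumerate tm).flatMap (fun r =>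
      (PySem.List.enumerate r.2).flatMap (fun e =>
        (neighboring_directions (e.1, r.1) ((PySem.List.pyGetD tm 0 []).length : Int) (tm.length : Int)).map
          (fun dir =>
            (e.2, PySem.List.pyGetD (PySem.List.pyGetD tm (r.1 + (pvDIRS.getD dir (0, 0)).2) [])
              (e.1 + (pvDIRS.getD dir (0, 0)).1) "", dir))))
    = pvStream tm := by
  rw [PySem.List.enumerate_eq_map_pyRange tm [], List.flatMap_map, PySem.List.len_eq,
    PySem.List.pyRange_zero_nat, List.flatMap_map]
  unfold pvStream
  refine List.flatMap_congr ?_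
  intro y hy
  have hy' : y < tm.length := List.mem_range.mp hy
  simp only [PySem.List.pyGetD_natCast]
  rw [PySem.List.enumerate_eq_map_pyRange (tm.getD y []) "", List.flatMap_map, PySem.List.len_eq,
    PySem.List.pyRange_zero_nat, List.flatMap_map]
  have hlen : (tm.getD y []).length = (tm.headD []).length := by
    rw [List.getD_eq_getElem _ _ hy']
    exact hrect _ (List.getElem_mem hy')
  rw [hlen]
  refine List.flatMap_congr ?_
  intro x hx
  have hx' : x < (tm.headD []).length := List.mem_range.mp hx
  simp only [PySem.List.pyGetD_natCast]
  exact pvCellA tm y x hy' hx' (pvHW0 tm)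

def pvCellB (c : String × Option String × Option String × Option String × Option String) :
    List (String × String × String) :=
  c.2.1.elim [] (fun n => [(c.1, n, "N")]) ++
  c.2.2.1.elim [] (fun s => [(c.1, s, "S")]) ++
  c.2.2.2.1.elim [] (fun w => [(c.1, w, "W")]) ++
  c.2.2.2.2.elim [] (fun e => [(c.1, e, "E")])

theorem pvInnerFold (l : List (String × Option String × Option String × Option String × Option String))
    (es : List (String × String × String)) :
    l.foldl (fun es c =>
      let es := c.2.1.elim es (fun n => es ++ [(c.1, n, "N")])
      let es := c.2.2.1.elim es (fun s => es ++ [(c.1, s, "S")])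
      let es := c.2.2.2.1.elim es (fun w => es ++ [(c.1, w, "W")])
      c.2.2.2.2.elim es (fun e => es ++ [(c.1, e, "E")])) es
    = es ++ l.flatMap pvCellB := by
  induction l generalizing es with
  | nil => simp
  | cons c cs ih =>
    obtain ⟨t, n, s, w, e⟩ := c
    cases n <;> cases s <;> cases w <;> cases e <;>
      simp [ih, pvCellB, List.append_assoc]

theorem pvOuterFold (L : List (List String × List (Option String) × List (Option String)))
    (es : List (String × String × String)) :
    L.foldl (fun es rns =>
      let row := rns.1
      let wr : List (Option String) := none :: PySem.List.slice (row.map some) none (some (-1))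
      let er : List (Option String) := PySem.List.slice (row.map some) (some 1) none ++ [none]
      (row.zip ((rns.2.1).zip ((rns.2.2).zip (wr.zip er)))).foldl (fun es c =>
        let es := c.2.1.elim es (fun n => es ++ [(c.1, n, "N")])
        let es := c.2.2.1.elim es (fun s => es ++ [(c.1, s, "S")])
        let es := c.2.2.2.1.elim es (fun w => es ++ [(c.1, w, "W")])
        c.2.2.2.2.elim es (fun e => es ++ [(c.1, e, "E")])) es) es
    = es ++ L.flatMap (fun rns =>
        (rns.1.zip ((rns.2.1).zip ((rns.2.2).zip
          ((none :: (rns.1.map some).dropLast).zip ((rns.1.map some).tail ++ [none]))))).flatMap pvCellB) := by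
  induction L generalizing es with
  | nil => simp
  | cons a L' ih =>
    rw [List.foldl_cons, ih, pvInnerFold]
    simp [PySem.List.slice_to_neg_one, PySem.List.slice_from_one, List.append_assoc]

def pvCellTup (tm : List (List String)) (y x : Nat) :
    String × Option String × Option String × Option String × Option String :=
  ((tm.getD y []).getD x "",
   (if y = 0 then none else some ((tm.getD (y - 1) []).getD x "")),
   (if y + 1 < tm.length then some ((tm.getD (y + 1) []).getD x "") else none),
   (if x = 0 then none else some ((tm.getD y []).getD (x - 1) "")),
   (if x + 1 < (tm.headD []).length then some ((tm.getD y []).getD (x + 1) "") else none))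

theorem pvCellBTup (tm : List (List String)) (y x : Nat) :
    pvCellB (pvCellTup tm y x) = pvCellList tm y x := by
  unfold pvCellB pvCellTup pvCellList
  by_cases h1 : y = 0 <;> by_cases h2 : y + 1 < tm.length <;>
    by_cases h3 : x = 0 <;> by_cases h4 : x + 1 < (tm.headD []).length <;>
    simp [h1, h2, h3, h4] <;> split_ifs <;> simp_all

def pvRowTup (tm : List (List String)) (y : Nat) :
    List String × List (Option String) × List (Option String) :=
  (tm.getD y [],
   (if y = 0 then List.replicate (tm.headD []).length none else (tm.getD (y - 1) []).map some),
   (if y + 1 < tm.length then (tm.getD (y + 1) []).map some else List.replicate (tm.headD []).length none))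

theorem pvZip5 (row : List String) (nr sr : List (Option String))
    (hnr : nr.length = row.length) (hsr : sr.length = row.length) :
    row.zip (nr.zip (sr.zip ((none :: (row.map some).dropLast).zip
      ((row.map some).tail ++ [none]))))
    = (List.range row.length).map (fun x => (row.getD x "", nr.getD x none, sr.getD x none,
        (if x = 0 then none else some (row.getD (x - 1) "")),
        (if x + 1 < row.length then some (row.getD (x + 1) "") else none))) := by
  apply List.ext_getElem
  · simp [List.length_tail, List.length_dropLast, hnr, hsr]
    omega
  · intro x hl hr
    have hx : x < row.length := by simpa using hr
    simp only [List.getElem_zip, List.getElem_map, List.getElem_range]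
    refine congrArg₂ Prod.mk ?_ (congrArg₂ Prod.mk ?_ (congrArg₂ Prod.mk ?_ (congrArg₂ Prod.mk ?_ ?_)))
    · exact (List.getD_eq_getElem _ _ hx).symm
    · exact (List.getD_eq_getElem _ _ (by omega)).symm
    · exact (List.getD_eq_getElem _ _ (by omega)).symm
    · cases x with
      | zero => simp
      | succ k =>
        have hk : k < (row.map some).dropLast.length := by
          simp [List.length_dropLast]
          omega
        rw [List.getElem_cons_succ, List.getElem_dropLast, List.getElem_map]
        rw [if_neg (by omega)]
        simp only [Nat.add_sub_cancel]
        rw [List.getD_eq_getElem _ _ (show k < row.length by omega)]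
    · by_cases h4 : x + 1 < row.length
      · have hb : x < (row.map some).tail.length := by
          simp [List.length_tail]
          omega
        rw [List.getElem_append]
        rw [dif_pos hb, List.getElem_tail, List.getElem_map, if_pos h4]
        rw [List.getD_eq_getElem _ _ h4]
      · have hb : ¬ x < (row.map some).tail.length := by
          simp [List.length_tail]
          omega
        rw [List.getElem_append, dif_neg hb, if_neg h4]
        simp

theorem pvZipInner (tm : List (List String)) (y : Nat) (hy : y < tm.length)
    (hrect : ∀ row ∈ tm, row.length = (tm.headD []).length) :
    (pvRowTup tm y).1.zip ((pvRowTup tm y).2.1.zip ((pvRowTup tm y).2.2.zip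
      ((none :: ((pvRowTup tm y).1.map some).dropLast).zip
        (((pvRowTup tm y).1.map some).tail ++ [none]))))
    = (List.range (tm.headD []).length).map (fun x => pvCellTup tm y x) := by
  show (tm.getD y []).zip ((pvRowTup tm y).2.1.zip ((pvRowTup tm y).2.2.zip
      ((none :: ((tm.getD y []).map some).dropLast).zip
        (((tm.getD y []).map some).tail ++ [none]))))
    = (List.range (tm.headD []).length).map (fun x => pvCellTup tm y x)
  have hlen : ∀ z : Nat, z < tm.length → (tm.getD z []).length = (tm.headD []).length := by
    intro z hz
    rw [List.getD_eq_getElem _ _ hz]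
    exact hrect _ (List.getElem_mem hz)
  have hW : (tm.getD y []).length = (tm.headD []).length := hlen y hy
  have hnr : (pvRowTup tm y).2.1.length = (tm.getD y []).length := by
    by_cases h1 : y = 0
    · simp only [pvRowTup, if_pos h1, List.length_replicate]
      exact hW.symm
    · simp only [pvRowTup, if_neg h1]
      rw [List.length_map, hlen _ (show y - 1 < tm.length by omega), hW]
  have hsr : (pvRowTup tm y).2.2.length = (tm.getD y []).length := by
    by_cases h2 : y + 1 < tm.length
    · simp only [pvRowTup, if_pos h2]
      rw [List.length_map, hlen _ h2, hW]
    · simp only [pvRowTup, if_neg h2, List.length_replicate]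
      exact hW.symm
  rw [pvZip5 _ _ _ hnr hsr, hW]
  refine List.map_congr_left ?_
  intro x hxm
  have hx : x < (tm.headD []).length := List.mem_range.mp hxm
  have hxrow : x < (tm.getD y []).length := by omega
  unfold pvCellTup
  refine congrArg₂ Prod.mk rfl (congrArg₂ Prod.mk ?_ (congrArg₂ Prod.mk ?_ rfl))
  · by_cases h1 : y = 0
    · simp [pvRowTup, h1]
    · simp only [pvRowTup, if_neg h1]
      have hb : x < ((tm.getD (y - 1) []).map some).length := by
        rw [List.length_map, hlen _ (show y - 1 < tm.length by omega)]
        exact hx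
      rw [List.getD_eq_getElem _ _ hb, List.getElem_map,
        List.getD_eq_getElem _ _ (show x < (tm.getD (y - 1) []).length by
          rw [hlen _ (show y - 1 < tm.length by omega)]; exact hx)]
  · by_cases h2 : y + 1 < tm.length
    · simp only [pvRowTup, if_pos h2]
      have hb : x < ((tm.getD (y + 1) []).map some).length := by
        rw [List.length_map, hlen _ h2]
        exact hx
      rw [List.getD_eq_getElem _ _ hb, List.getElem_map,
        List.getD_eq_getElem _ _ (show x < (tm.getD (y + 1) []).length by
          rw [hlen _ h2]; exact hx)]
    · simp [pvRowTup, h2]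

theorem pvZipOuter (tm : List (List String)) (hne : tm ≠ []) :
    tm.zip (((List.replicate (tm.headD []).length (none : Option String)) ::
        (tm.map (fun r => r.map some)).dropLast).zip
        ((tm.map (fun r => r.map some)).tail ++ [List.replicate (tm.headD []).length none]))
    = (List.range tm.length).map (fun y => pvRowTup tm y) := by
  have hH : 0 < tm.length := List.length_pos_iff.mpr hne
  apply List.ext_getElem
  · simp [List.length_zip, List.length_dropLast, List.length_tail]
    omega
  · intro y hyl hyr
    have hy : y < tm.length := by
      simpa using hyr
    simp only [List.getElem_zip, List.getElem_map, List.getElem_range]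
    unfold pvRowTup
    refine congrArg₂ Prod.mk ?_ (congrArg₂ Prod.mk ?_ ?_)
    · exact (List.getD_eq_getElem _ _ hy).symm
    · cases y with
      | zero => simp
      | succ k =>
        have hk : k < (tm.map (fun r => r.map some)).dropLast.length := by
          simp [List.length_dropLast]; omega
        simp only [List.getElem_cons_succ, List.getElem_dropLast, List.getElem_map]
        have hk' : k < tm.length := by omega
        simp [List.getElem?_eq_getElem hk']
    · by_cases hlast : y + 1 < tm.length
      · have h1 : y < (tm.map (fun r => r.map some)).tail.length := by
          simp [List.length_tail]; omega
        rw [List.getElem_append]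
        simp only [h1, dif_pos]
        have : y + 1 < tm.length := hlast
        simp [List.getElem_tail, hlast]
      · have hy1 : y = tm.length - 1 := by omega
        have h1 : ¬ y < (tm.map (fun r => r.map some)).tail.length := by
          simp [List.length_tail]; omega
        rw [List.getElem_append]
        simp [hlast, List.length_tail]
        intro h
        exact absurd h (by omega)

theorem pvStreamB (tm : List (List String)) (hne : tm ≠ [])
    (hrect : ∀ row ∈ tm, row.length = (tm.headD []).length) :
    ((tm.zip (((List.replicate (PySem.List.pyGetD tm 0 []).length none) ::
        PySem.List.slice (tm.map (fun r => r.map some)) none (some (-1))).zip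
        (PySem.List.slice (tm.map (fun r => r.map some)) (some 1) none ++
          [List.replicate (PySem.List.pyGetD tm 0 []).length none]))).foldl (fun es rns =>
      let row := rns.1
      let wr : List (Option String) := none :: PySem.List.slice (row.map some) none (some (-1))
      let er : List (Option String) := PySem.List.slice (row.map some) (some 1) none ++ [none]
      (row.zip ((rns.2.1).zip ((rns.2.2).zip (wr.zip er)))).foldl (fun es c =>
        let es := c.2.1.elim es (fun n => es ++ [(c.1, n, "N")])
        let es := c.2.2.1.elim es (fun s => es ++ [(c.1, s, "S")])
        let es := c.2.2.2.1.elim es (fun w => es ++ [(c.1, w, "W")])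
        c.2.2.2.2.elim es (fun e => es ++ [(c.1, e, "E")])) es)
      ([] : List (String × String × String)))
    = pvStream tm := by
  rw [pvOuterFold, List.nil_append]
  rw [pvHW0 tm]
  simp only [PySem.List.slice_to_neg_one, PySem.List.slice_from_one]
  rw [pvZipOuter tm hne]
  rw [List.flatMap_map]
  unfold pvStream
  refine List.flatMap_congr ?_
  intro y hym
  have hy : y < tm.length := List.mem_range.mp hym
  rw [pvZipInner tm y hy hrect]
  rw [List.flatMap_map]
  refine List.flatMap_congr ?_
  intro x hxm
  exact pvCellBTup tm y x

-- the dict loops of the two ports agree: A's nested per-cell counting is counting over the flattened grid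
theorem pvDictSides (tm : List (List String)) :
    (PySem.List.enumerate tm).foldl (fun d r =>
        (PySem.List.enumerate r.2).foldl (fun d e =>
          (if d.contains e.2 then d else d.insert e.2 0).modify e.2 0 (· + 1)) d)
      (PySem.Dict.empty : PySem.Dict String Int)
    = (tm.flatMap (fun row => row)).foldl
        (fun d tile => d.insert tile (d.getD tile 0 + 1)) (PySem.Dict.empty : PySem.Dict String Int) := by
  rw [pvFoldlEnumSnd tm (fun (d : PySem.Dict String Int) (row : List String) =>
    (PySem.List.enumerate row).foldl (fun d e =>
      (if d.contains e.2 then d else d.insert e.2 0).modify e.2 0 (· + 1)) d)]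
  rw [List.foldl_flatMap]
  apply PySem.List.foldl_congr_mem
  intro d row _
  rw [pvFoldlEnumSnd row (fun (d : PySem.Dict String Int) (tile : String) =>
    (if d.contains tile then d else d.insert tile 0).modify tile 0 (· + 1))]
  apply PySem.List.foldl_congr_mem
  intro d tile _
  exact pvDictStep d tile

-- the set loop of A agrees with B's shifted-grid edge stream (on rectangular nonempty maps)
theorem pvSetSides (tm : List (List String)) (hne : tm ≠ [])
    (hrect : ∀ row ∈ tm, row.length = (tm.headD []).length) :
    (PySem.List.enumerate tm).foldl (fun s r =>
        (PySem.List.enumerate r.2).foldl (fun s e =>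
          (neighboring_directions (e.1, r.1) ((PySem.List.pyGetD tm 0 []).length : Int) (tm.length : Int)).foldl
            (fun s dir =>
              let dxy := pvDIRS.getD dir (0, 0)
              PySem.Set.add s (e.2,
                PySem.List.pyGetD (PySem.List.pyGetD tm (r.1 + dxy.2) []) (e.1 + dxy.1) "",
                dir)) s) s)
      (PySem.Set.empty : PySem.Set (String × String × String))
    = PySem.Set.ofList
        ((tm.zip (((List.replicate (PySem.List.pyGetD tm 0 []).length none) ::
            PySem.List.slice (tm.map (fun r => r.map some)) none (some (-1))).zip
            (PySem.List.slice (tm.map (fun r => r.map some)) (some 1) none ++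
              [List.replicate (PySem.List.pyGetD tm 0 []).length none]))).foldl (fun es rns =>
          let row := rns.1
          let wr : List (Option String) := none :: PySem.List.slice (row.map some) none (some (-1))
          let er : List (Option String) := PySem.List.slice (row.map some) (some 1) none ++ [none]
          (row.zip ((rns.2.1).zip ((rns.2.2).zip (wr.zip er)))).foldl (fun es c =>
            let es := c.2.1.elim es (fun n => es ++ [(c.1, n, "N")])
            let es := c.2.2.1.elim es (fun s => es ++ [(c.1, s, "S")])
            let es := c.2.2.2.1.elim es (fun w => es ++ [(c.1, w, "W")])
            c.2.2.2.2.elim es (fun e => es ++ [(c.1, e, "E")])) es)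
          ([] : List (String × String × String))) := by
  simp only [← PySem.Set.update_map_eq_foldl_add, pvFoldlUpdateFlatMap,
    PySem.Set.empty, PySem.Set.update_nil_left]
  rw [pvStreamA tm hrect, pvStreamB tm hne hrect]

-- ===== VERDICT (by name: the statement is the Claim_ definition above) =====
theorem parse_tile_map_spec : Claim_equal_parse_tile_map := by
  intro tm hdom hpre
  obtain ⟨hne, hrect⟩ := hpre
  unfold Spec_parse_tile_map
  refine Eq.trans
    (congrArg (fun p : PySem.Set (String × String × String) × PySem.Dict String Int => (p.1, p.2.items))
      (pvFoldlProd (PySem.List.enumerate tm) (fun r => PySem.List.enumerate r.2)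
        (fun r s e =>
          (neighboring_directions (e.1, r.1) ((PySem.List.pyGetD tm 0 []).length : Int) (tm.length : Int)).foldl
            (fun s dir =>
              let dxy := pvDIRS.getD dir (0, 0)
              PySem.Set.add s (e.2,
                PySem.List.pyGetD (PySem.List.pyGetD tm (r.1 + dxy.2) []) (e.1 + dxy.1) "",
                dir)) s)
        (fun _ (d : PySem.Dict String Int) (e : Int × String) =>
          (if d.contains e.2 then d else d.insert e.2 0).modify e.2 0 (· + 1))
        PySem.Set.empty PySem.Dict.empty)) ?_
  exact congrArg₂ Prod.mk (pvSetSides tm hne hrect) (congrArg PySem.Dict.items (pvDictSides tm))
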